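-- pv_equiv track=rewrite | github.com/rlampel/PySHeRLOC | utils/blocksqp_utils/get_block_sizes.py | get_vblock_sizes
-- ===== SOURCE A (Python) =====
-- def get_vblock_sizes(x_dim, q_dim, lifting_points):
--     """Compute the sizes of the blocks corresponding to dependent and independent
--     variables.
--
--     Keyword arguments:
--         x_dim  -- number of differential states
--         q_dim  -- number of controls
--         lifting_points  -- zero-one vector indicating where to introduce lifting points
--     """
--     vblock_sizes = []
--     vblock_dependencies = []
--
--     # the first states are independent
--     curr_size = x_dim + q_dim
--
--     for i in lifting_points[1:-1]:
--         if i: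
--             if curr_size > 0:
--                 vblock_sizes += [curr_size]
--                 vblock_dependencies += [False]
--             vblock_sizes += [x_dim]
--             vblock_dependencies += [True]
--             curr_size = 0
--
--         curr_size += q_dim
--
--     # add variables for the last shooting interval
--     if curr_size > 0:
--         vblock_sizes += [curr_size]
--         vblock_dependencies += [False]
--
--     if lifting_points[-1]:
--         # add last states
--         vblock_sizes += [x_dim]
--         vblock_dependencies += [True]
--
--     return vblock_sizes, vblock_dependencies
-- ===== SOURCE B (Python) =====
-- def get_vblock_sizes(x_dim, q_dim, lifting_points):
--     """Boundary-difference reconstruction: compute the lifting positions in the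
--     middle region, derive every independent block size from differences of
--     consecutive boundaries, then interleave the dependent blocks as a flat list
--     of (size, dependency) pairs and unzip at the end."""
--     mid = lifting_points[1:-1]
--     positions = [i for i, v in enumerate(mid) if v]
--     bounds = [0] + positions + [len(mid)]
--     diffs = [b - a for a, b in zip(bounds, bounds[1:])]
--     raw = [x_dim + q_dim + q_dim * diffs[0]] + [q_dim * d for d in diffs[1:]]
--     blocks = [blk
--               for k, seg in enumerate(raw)
--               for blk in ([(seg, False)] if seg > 0 else [])
--                          + ([(x_dim, True)] if k < len(positions) else [])]
--     if lifting_points[-1]: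
--         blocks = blocks + [(x_dim, True)]
--     return [s for s, _ in blocks], [d for _, d in blocks]
-- ===== Notes on version B (the rewrite author's own statement) =====
-- stated objective: alternative
-- what changed: B abandons A's per-element running accumulator: it computes the lifting positions of the middle region, derives every independent block size arithmetically from differences of consecutive boundaries, interleaves the dependent blocks into one flat list of (size, dependency) pairs, and unzips at the end.
import Mathlib
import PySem

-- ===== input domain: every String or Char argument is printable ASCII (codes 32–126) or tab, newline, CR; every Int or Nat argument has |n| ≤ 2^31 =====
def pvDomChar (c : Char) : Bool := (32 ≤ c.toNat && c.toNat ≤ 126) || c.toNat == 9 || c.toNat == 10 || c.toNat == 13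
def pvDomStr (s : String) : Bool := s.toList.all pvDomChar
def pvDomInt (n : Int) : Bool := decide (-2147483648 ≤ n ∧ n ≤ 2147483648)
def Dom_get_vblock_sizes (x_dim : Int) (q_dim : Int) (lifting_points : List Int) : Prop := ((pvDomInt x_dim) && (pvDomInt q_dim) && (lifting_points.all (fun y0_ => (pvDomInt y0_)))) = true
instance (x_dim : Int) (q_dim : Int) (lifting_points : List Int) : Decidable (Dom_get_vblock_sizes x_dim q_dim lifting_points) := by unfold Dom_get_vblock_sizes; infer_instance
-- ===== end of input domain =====

-- B replaces A's per-element running accumulator with boundary-difference arithmetic: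
-- lifting positions → consecutive-boundary differences → block sizes, interleaved as one
-- list of (size, dependency) pairs and unzipped (objective: alternative decomposition).

-- ===== PORT A =====
-- one iteration of A's for-loop over lifting_points[1:-1]; state = (vblock_sizes, vblock_dependencies, curr_size)
def pvAStep (x_dim q_dim : Int) (acc : List Int × List Bool × Int) (i : Int) : List Int × List Bool × Int :=
  let s := acc.1
  let d := acc.2.1
  let c := acc.2.2
  if i ≠ 0 then
    let s := if c > 0 then s ++ [c] else s
    let d := if c > 0 then d ++ [false] else d
    (s ++ [x_dim], d ++ [true], (0 : Int) + q_dim)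
  else
    (s, d, c + q_dim)

def get_vblock_sizes (x_dim : Int) (q_dim : Int) (lifting_points : List Int) : List Int × List Bool :=
  let mid := PySem.List.slice lifting_points (some 1) (some (-1))
  let st := mid.foldl (pvAStep x_dim q_dim) ([], [], x_dim + q_dim)
  let s := st.1
  let d := st.2.1
  let c := st.2.2
  let s := if c > 0 then s ++ [c] else s
  let d := if c > 0 then d ++ [false] else d
  -- lifting_points[-1]: Pre_ guarantees nonempty, so pyGet? is some; getD 0 outside Pre_
  if ((PySem.List.pyGet? lifting_points (-1)).getD 0) ≠ 0 then
    (s ++ [x_dim], d ++ [true])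
  else
    (s, d)

-- ===== PORT B =====
-- positions of the truthy entries of the middle region (the enumerate-comprehension)
def pvPositions (mid : List Int) : List Int :=
  (PySem.List.enumerate mid).filterMap (fun p => if p.2 ≠ 0 then some p.1 else none)

-- raw block sizes from the boundary differences (Python's diffs[0] / diffs[1:] split;
-- diffs is never [] in the caller, where Python's diffs[0] would raise)
def pvRawBlocks (x q : Int) : List Int → List Int
  | [] => []
  | d0 :: rest => (x + q + q * d0) :: rest.map (fun d => q * d)

def get_vblock_sizes_alt (x_dim : Int) (q_dim : Int) (lifting_points : List Int) : List Int × List Bool :=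
  let mid := PySem.List.slice lifting_points (some 1) (some (-1))
  let positions := pvPositions mid
  let bounds := 0 :: positions ++ [(mid.length : Int)]
  let diffs := (bounds.zip bounds.tail).map (fun p => p.2 - p.1)
  let raw := pvRawBlocks x_dim q_dim diffs
  let blocks := (PySem.List.enumerate raw).flatMap (fun p =>
      (if p.2 > 0 then [(p.2, false)] else []) ++
      (if p.1 < (positions.length : Int) then [(x_dim, true)] else []))
  let blocks := if ((PySem.List.pyGet? lifting_points (-1)).getD 0) ≠ 0 then
      blocks ++ [(x_dim, true)]
    else blocks
  (blocks.map Prod.fst, blocks.map Prod.snd)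

-- ===== PRECONDITION & SPEC =====
-- A evaluates lifting_points[-1], an IndexError on the empty list; Pre_ excludes exactly that.
def Pre_get_vblock_sizes (x_dim : Int) (q_dim : Int) (lifting_points : List Int) : Prop :=
  lifting_points ≠ []
instance (x_dim : Int) (q_dim : Int) (lifting_points : List Int) : Decidable (Pre_get_vblock_sizes x_dim q_dim lifting_points) := by unfold Pre_get_vblock_sizes; infer_instance

def pvWitness_get_vblock_sizes : Int × Int × List Int := (2, 1, [1, 0, 1, 0, 1])

def Spec_get_vblock_sizes (x_dim : Int) (q_dim : Int) (lifting_points : List Int) (out : List Int × List Bool) : Prop := out = get_vblock_sizes_alt x_dim q_dim lifting_points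
instance (x_dim : Int) (q_dim : Int) (lifting_points : List Int) (out : List Int × List Bool) : Decidable (Spec_get_vblock_sizes x_dim q_dim lifting_points out) := by unfold Spec_get_vblock_sizes; infer_instance

-- ===== CLAIM (what is proved, stated in full; the proofs are below) =====
def Claim_equal_get_vblock_sizes : Prop := ∀ (x_dim : Int) (q_dim : Int) (lifting_points : List Int), Dom_get_vblock_sizes x_dim q_dim lifting_points → Pre_get_vblock_sizes x_dim q_dim lifting_points → Spec_get_vblock_sizes x_dim q_dim lifting_points (get_vblock_sizes x_dim q_dim lifting_points)

-- ===== LEMMAS AND PROOFS =====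

-- the common reference shape: the list of (size, dependency) blocks generated by
-- the lifting positions ps of a middle region of length n, with pending base/prev
def pvSpec (x q : Int) : Int → Int → List Int → Int → List (Int × Bool)
  | base, prev, [], n =>
      if base + q * (n - prev) > 0 then [(base + q * (n - prev), false)] else []
  | base, prev, p :: ps, n =>
      (if base + q * (p - prev) > 0 then [(base + q * (p - prev), false)] else []) ++
        (x, true) :: pvSpec x q 0 p ps n

-- ----- A side: A's foldl equals an unzip of pvSpec -----

-- final flush of A's accumulator (the "last shooting interval" lines)
def pvFlushA (st : List Int × List Bool × Int) : List Int × List Bool :=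
  (if st.2.2 > 0 then st.1 ++ [st.2.2] else st.1,
   if st.2.2 > 0 then st.2.1 ++ [false] else st.2.1)

-- middle-man: a segment-indexed fold over the lifting positions
def pvMStep (x q : Int) (acc : List Int × List Bool × Int × Int) (p : Int) :
    List Int × List Bool × Int × Int :=
  let s := acc.1
  let d := acc.2.1
  let base := acc.2.2.1
  let prev := acc.2.2.2
  let seg := base + q * (p - prev)
  let s := if seg > 0 then s ++ [seg] else s
  let d := if seg > 0 then d ++ [false] else d
  (s ++ [x], d ++ [true], (0 : Int), p)

def pvFlushM (q n : Int) (st : List Int × List Bool × Int × Int) : List Int × List Bool :=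
  (if st.2.2.1 + q * (n - st.2.2.2) > 0 then st.1 ++ [st.2.2.1 + q * (n - st.2.2.2)] else st.1,
   if st.2.2.1 + q * (n - st.2.2.2) > 0 then st.2.1 ++ [false] else st.2.1)

-- pvPositions generalized to an arbitrary enumeration start
def pvPositionsFrom (mid : List Int) (s : Int) : List Int :=
  (PySem.List.enumerate mid s).filterMap (fun p => if p.2 ≠ 0 then some p.1 else none)

lemma pvPositionsFrom_cons (h : Int) (t : List Int) (s : Int) :
    pvPositionsFrom (h :: t) s =
      (if h ≠ 0 then [s] else []) ++ pvPositionsFrom t (s + 1) := by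
  simp only [pvPositionsFrom, PySem.List.enumerate_cons, List.filterMap_cons]
  split_ifs <;> simp_all

-- the loop invariant: A's running accumulator c equals the pending segment size
lemma pvCore (x q : Int) : ∀ (mid : List Int) (s : List Int) (d : List Bool)
    (c base prev start : Int), base + q * (start - prev) = c →
    pvFlushA (mid.foldl (pvAStep x q) (s, d, c)) =
    pvFlushM q (start + mid.length) ((pvPositionsFrom mid start).foldl (pvMStep x q) (s, d, base, prev)) := by
  intro mid
  induction mid with
  | nil =>
    intro s d c base prev start hc
    simp only [pvPositionsFrom, PySem.List.enumerate_nil, List.filterMap_nil, List.foldl_nil,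
      List.length_nil, pvFlushA, pvFlushM]
    rw [show base + q * (start + ((0 : Nat) : Int) - prev) = c by rw [← hc]; push_cast; ring]
  | cons h t ih =>
    intro s d c base prev start hc
    rw [pvPositionsFrom_cons]
    have hlen : start + (((h :: t).length : Nat) : Int) = (start + 1) + ((t.length : Nat) : Int) := by
      push_cast [List.length_cons]; ring
    by_cases hh : h = 0
    · subst hh
      rw [if_neg (by simp), List.nil_append, List.foldl_cons,
        show pvAStep x q (s, d, c) 0 = (s, d, c + q) by simp [pvAStep], hlen,
        ih s d (c + q) base prev (start + 1) (by rw [← hc]; ring)]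
    · rw [if_pos hh, List.singleton_append, List.foldl_cons, List.foldl_cons,
        show pvAStep x q (s, d, c) h =
          ((if c > 0 then s ++ [c] else s) ++ [x], (if c > 0 then d ++ [false] else d) ++ [true], 0 + q)
          by simp [pvAStep, hh],
        show pvMStep x q (s, d, base, prev) start =
          ((if c > 0 then s ++ [c] else s) ++ [x], (if c > 0 then d ++ [false] else d) ++ [true], (0 : Int), start)
          by simp only [pvMStep, hc],
        hlen, ih _ _ (0 + q) 0 start (start + 1) (by ring)]

-- the middle-man fold unzips pvSpec
lemma pvM_spec (x q n : Int) : ∀ (ps : List Int) (s : List Int) (d : List Bool) (base prev : Int),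
    pvFlushM q n (ps.foldl (pvMStep x q) (s, d, base, prev)) =
      (s ++ (pvSpec x q base prev ps n).map Prod.fst,
       d ++ (pvSpec x q base prev ps n).map Prod.snd) := by
  intro ps
  induction ps with
  | nil =>
    intro s d base prev
    simp only [List.foldl_nil, pvFlushM, pvSpec]
    split_ifs <;> simp
  | cons p ps ih =>
    intro s d base prev
    rw [List.foldl_cons, show pvMStep x q (s, d, base, prev) p =
        ((if base + q * (p - prev) > 0 then s ++ [base + q * (p - prev)] else s) ++ [x],
         (if base + q * (p - prev) > 0 then d ++ [false] else d) ++ [true], (0 : Int), p) from rfl,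
      ih]
    simp only [pvSpec]
    split_ifs <;> simp

-- ----- B side: the bounds/diffs/flatMap construction equals pvSpec -----

-- the boundary differences, structurally
def pvDiffs : Int → List Int → Int → List Int
  | prev, [], n => [n - prev]
  | prev, p :: ps, n => (p - prev) :: pvDiffs p ps n

lemma pvZip_diffs : ∀ (ps : List Int) (prev n : Int),
    (((prev :: ps ++ [n]).zip (ps ++ [n])).map (fun p => p.2 - p.1)) = pvDiffs prev ps n := by
  intro ps
  induction ps with
  | nil => intro prev n; simp [pvDiffs]
  | cons p ps ih =>
    intro prev n
    simp only [List.cons_append, List.zip_cons_cons, List.map_cons, pvDiffs]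
    rw [← List.cons_append, ih]

-- the raw block sizes, structurally
def pvRawOf (q : Int) : Int → Int → List Int → Int → List Int
  | c, prev, [], n => [c + q * (n - prev)]
  | c, prev, p :: ps, n => (c + q * (p - prev)) :: pvRawOf q 0 p ps n

lemma pvDiffs_map (q : Int) : ∀ (ps : List Int) (prev n : Int),
    (pvDiffs prev ps n).map (fun d => q * d) = pvRawOf q 0 prev ps n := by
  intro ps
  induction ps with
  | nil => intro prev n; simp [pvDiffs, pvRawOf]
  | cons p ps ih => intro prev n; simp only [pvDiffs, List.map_cons, pvRawOf, zero_add]; rw [ih]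

lemma pvRaw_eq (x q : Int) : ∀ (ps : List Int) (prev n : Int),
    pvRawBlocks x q (pvDiffs prev ps n) = pvRawOf q (x + q) prev ps n := by
  intro ps prev n
  cases ps with
  | nil => simp [pvDiffs, pvRawBlocks, pvRawOf]
  | cons p ps => simp only [pvDiffs, pvRawBlocks, pvRawOf]; rw [pvDiffs_map]

-- interleaving over enumerate(raw) equals pvSpec (threshold L = j + number of positions)
lemma pvEnum_spec (x q n : Int) : ∀ (ps : List Int) (c prev j L : Int),
    L = j + (ps.length : Int) →
    (PySem.List.enumerate (pvRawOf q c prev ps n) j).flatMap (fun p =>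
        (if p.2 > 0 then [(p.2, false)] else []) ++
        (if p.1 < L then [((x : Int), true)] else [])) = pvSpec x q c prev ps n := by
  intro ps
  induction ps with
  | nil =>
    intro c prev j L hL
    simp only [List.length_nil] at hL
    push_cast at hL
    simp only [pvRawOf, PySem.List.enumerate_cons, PySem.List.enumerate_nil, List.flatMap_cons,
      List.flatMap_nil, pvSpec, List.append_nil]
    have hj : ¬ j < L := by omega
    simp only [if_neg hj, List.append_nil]
  | cons p ps ih =>
    intro c prev j L hL
    simp only [List.length_cons] at hL
    push_cast at hL
    simp only [pvRawOf, PySem.List.enumerate_cons, List.flatMap_cons, pvSpec]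
    rw [ih 0 p (j + 1) L (by omega)]
    have hj : j < L := by omega
    simp only [if_pos hj]
    split_ifs <;> simp

-- port B rewritten through pvSpec
lemma portB_core (x q : Int) (l : List Int) :
    get_vblock_sizes_alt x q l =
      (let mid := PySem.List.slice l (some 1) (some (-1));
       let blocks := pvSpec x q (x + q) 0 (pvPositions mid) (mid.length : Int);
       let blocks := if ((PySem.List.pyGet? l (-1)).getD 0) ≠ 0 then
           blocks ++ [(x, true)]
         else blocks;
       (blocks.map Prod.fst, blocks.map Prod.snd)) := by
  have h0 : get_vblock_sizes_alt x q l =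
      (let mid := PySem.List.slice l (some 1) (some (-1));
       let positions := pvPositions mid;
       let raw := pvRawBlocks x q
         (((0 :: positions ++ [(mid.length : Int)]).zip (positions ++ [(mid.length : Int)])).map
           (fun p => p.2 - p.1));
       let blocks := (PySem.List.enumerate raw).flatMap (fun p =>
           (if p.2 > 0 then [(p.2, false)] else []) ++
           (if p.1 < (positions.length : Int) then [(x, true)] else []));
       let blocks := if ((PySem.List.pyGet? l (-1)).getD 0) ≠ 0 then
           blocks ++ [(x, true)]
         else blocks;
       (blocks.map Prod.fst, blocks.map Prod.snd)) := rfl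
  rw [h0]
  simp only []
  rw [pvZip_diffs, pvRaw_eq,
    pvEnum_spec x q ((PySem.List.slice l (some 1) (some (-1))).length : Int)
      (pvPositions (PySem.List.slice l (some 1) (some (-1)))) (x + q) 0 0
      ((pvPositions (PySem.List.slice l (some 1) (some (-1)))).length : Int) (by omega)]

-- ===== VERDICT (by name: the statement is the Claim_ definition above) =====
theorem get_vblock_sizes_spec : Claim_equal_get_vblock_sizes := by
  intro x q l _ _
  unfold Spec_get_vblock_sizes
  rw [portB_core]
  show (let st := (PySem.List.slice l (some 1) (some (-1))).foldl (pvAStep x q) ([], [], x + q);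
        let s := if st.2.2 > 0 then st.1 ++ [st.2.2] else st.1;
        let d := if st.2.2 > 0 then st.2.1 ++ [false] else st.2.1;
        if ((PySem.List.pyGet? l (-1)).getD 0) ≠ 0 then (s ++ [x], d ++ [true]) else (s, d)) = _
  have h := pvCore x q (PySem.List.slice l (some 1) (some (-1))) [] [] (x + q) (x + q) 0 0 (by ring)
  rw [zero_add] at h
  have h2 := pvM_spec x q ((PySem.List.slice l (some 1) (some (-1))).length : Int)
    (pvPositionsFrom (PySem.List.slice l (some 1) (some (-1))) 0) [] [] (x + q) 0
  rw [h2, show pvPositionsFrom (PySem.List.slice l (some 1) (some (-1))) 0 =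
      pvPositions (PySem.List.slice l (some 1) (some (-1))) from rfl] at h
  show (if ((PySem.List.pyGet? l (-1)).getD 0) ≠ 0 then
          ((pvFlushA ((PySem.List.slice l (some 1) (some (-1))).foldl (pvAStep x q) ([], [], x + q))).1 ++ [x],
           (pvFlushA ((PySem.List.slice l (some 1) (some (-1))).foldl (pvAStep x q) ([], [], x + q))).2 ++ [true])
        else pvFlushA ((PySem.List.slice l (some 1) (some (-1))).foldl (pvAStep x q) ([], [], x + q))) = _
  rw [h]
  split_ifs <;> simp [List.map_append]
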